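-- pv_equiv track=rewrite | github.com/birhanu-ma/A2SV-Solved-Questions | maximum-sum.py | maxSumRangeQuery
-- ===== SOURCE A (Python) =====
-- from typing import List
--
-- def maxSumRangeQuery(nums: List[int], requests: List[List[int]]) -> int:
--     n = len(nums)
--     count = [0]*(n+1)
--     for start , end in requests:
--         count[start]+=1
--         count[end+1]-=1
--     for i in range(1, n+1):
--         count[i]+=count[i-1]
--     res = 0
--     for nums, count in zip(sorted(count[:-1]), sorted(nums)):
--         res+=nums*count
--     return res%(10**9+7)
-- ===== SOURCE B (Python) =====
-- from typing import List
--
-- def maxSumRangeQuery(nums: List[int], requests: List[List[int]]) -> int: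
--     # Direct per-index counting instead of a difference array + prefix sums.
--     n = len(nums)
--     counts = [sum(1 for s, e in requests if s <= i <= e) for i in range(n)]
--     res = sum(c * v for c, v in zip(sorted(counts), sorted(nums)))
--     return res % (10 ** 9 + 7)
-- ===== Notes on version B (the rewrite author's own statement) =====
-- stated objective: simpler
-- what changed: The coverage counts are computed by a direct per-index scan over the requests (count[i] = number of requests whose inclusive range contains i) instead of A's difference-array increments followed by an in-place prefix-sum pass; the greedy sort-zip-sum and final modulo are kept.
-- outside the precondition, e.g. on maxSumRangeQuery([1, 2, 3], [[2, 0]]): A returns 1000000006, B returns 0; on maxSumRangeQuery([1, 2], [[-1, 0]]): A returns 1000000006, B returns 2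
import Mathlib
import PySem

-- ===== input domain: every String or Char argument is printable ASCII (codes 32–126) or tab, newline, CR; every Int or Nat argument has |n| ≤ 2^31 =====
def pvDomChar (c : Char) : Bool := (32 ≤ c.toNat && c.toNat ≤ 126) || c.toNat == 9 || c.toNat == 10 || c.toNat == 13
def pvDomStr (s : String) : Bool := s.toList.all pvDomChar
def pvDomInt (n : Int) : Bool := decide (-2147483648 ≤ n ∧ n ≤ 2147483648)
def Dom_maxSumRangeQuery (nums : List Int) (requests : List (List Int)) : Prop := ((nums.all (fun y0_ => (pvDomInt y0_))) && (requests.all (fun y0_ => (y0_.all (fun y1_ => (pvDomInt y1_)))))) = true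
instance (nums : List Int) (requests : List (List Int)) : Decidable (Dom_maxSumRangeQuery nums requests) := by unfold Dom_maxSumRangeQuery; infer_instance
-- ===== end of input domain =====

-- B replaces A's difference-array + prefix-sum coverage computation by a direct per-index
-- scan over the requests (simpler, same greedy pairing and modulo); return value only.

-- ===== PORT A =====
-- loop body of A's first pass: count[start] += 1; count[end+1] -= 1
def pvStepA (c : List Int) (r : List Int) : List Int :=
  let start := PySem.List.pyGetD r 0 0
  let stop := PySem.List.pyGetD r 1 0
  let c := PySem.List.pySetD c start (PySem.List.pyGetD c start 0 + 1)
  PySem.List.pySetD c (stop+1) (PySem.List.pyGetD c (stop+1) 0 - 1)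

def maxSumRangeQuery (nums : List Int) (requests : List (List Int)) : Int :=
  let n := nums.length
  let count0 : List Int := List.replicate (n+1) 0
  let count1 := requests.foldl pvStepA count0
  let count2 := (PySem.List.pyRange 1 ((n:Int)+1) 1).foldl (fun c i =>
    PySem.List.pySetD c i (PySem.List.pyGetD c i 0 + PySem.List.pyGetD c (i-1) 0)) count1
  let res := ((PySem.List.sorted (PySem.List.slice count2 none (some (-1))) (fun x => x) false).zip
      (PySem.List.sorted nums (fun x => x) false)).foldl (fun res p => res + p.1 * p.2) 0
  PySem.Int.mod res (10^9+7)

-- ===== PORT B =====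
def maxSumRangeQuery_alt (nums : List Int) (requests : List (List Int)) : Int :=
  let n := nums.length
  let counts := (PySem.List.pyRange 0 (n:Int) 1).map (fun i =>
    requests.foldl (fun acc r =>
      if PySem.List.pyGetD r 0 0 ≤ i ∧ i ≤ PySem.List.pyGetD r 1 0 then acc + 1 else acc) 0)
  let res := ((PySem.List.sorted counts (fun x => x) false).zip
      (PySem.List.sorted nums (fun x => x) false)).foldl (fun res p => res + p.1 * p.2) 0
  PySem.Int.mod res (10^9+7)

-- ===== PRECONDITION & SPEC =====
-- Pre_ restricts to the problem's natural domain of valid inclusive ranges 0 <= start <= end < len(nums)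
-- given as two-element lists: outside it A raises (ValueError on unpacking, IndexError past the diff array)
-- or returns only via accidents of its implementation (negative-index wraparound; a start > end request
-- leaking negative coverage counts out of the difference array).
def Pre_maxSumRangeQuery (nums : List Int) (requests : List (List Int)) : Prop :=
  ∀ r ∈ requests, r.length = 2 ∧ 0 ≤ PySem.List.pyGetD r 0 0 ∧
    PySem.List.pyGetD r 0 0 ≤ PySem.List.pyGetD r 1 0 ∧
    PySem.List.pyGetD r 1 0 < (nums.length : Int)
instance (nums : List Int) (requests : List (List Int)) : Decidable (Pre_maxSumRangeQuery nums requests) := by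
  unfold Pre_maxSumRangeQuery; infer_instance

def pvWitness_maxSumRangeQuery : List Int × List (List Int) := ([2, 3, 4, 5, 10], [[0, 2], [1, 3], [1, 1]])

def Spec_maxSumRangeQuery (nums : List Int) (requests : List (List Int)) (out : Int) : Prop := out = maxSumRangeQuery_alt nums requests
instance (nums : List Int) (requests : List (List Int)) (out : Int) : Decidable (Spec_maxSumRangeQuery nums requests out) := by unfold Spec_maxSumRangeQuery; infer_instance

-- ===== CLAIM (what is proved, stated in full; the proofs are below) =====
def Claim_equal_maxSumRangeQuery : Prop := ∀ (nums : List Int) (requests : List (List Int)), Dom_maxSumRangeQuery nums requests → Pre_maxSumRangeQuery nums requests → Spec_maxSumRangeQuery nums requests (maxSumRangeQuery nums requests)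

-- ===== LEMMAS AND PROOFS =====

-- per-request contribution to the difference array at position j
def pvDeltaOne (j : Int) (r : List Int) : Int :=
  (if PySem.List.pyGetD r 0 0 = j then 1 else 0) - (if PySem.List.pyGetD r 1 0 + 1 = j then 1 else 0)


theorem pv_getD_set (c : List Int) (a j : Nat) (v : Int) (ha : a < c.length) :
    (c.set a v).getD j 0 = if j = a then v else c.getD j 0 := by
  rcases eq_or_ne j a with rfl | hne
  · simp [List.getD, ha]
  · simp [List.getD, hne, Ne.symm hne]

theorem pv_sum_take_succ (c : List Int) (j : Nat) (hj : j < c.length) :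
    (c.take (j+1)).sum = (c.take j).sum + c.getD j 0 := by
  rw [List.take_add_one, List.getElem?_eq_getElem hj, List.sum_append]
  simp [List.getD, List.getElem?_eq_getElem hj]

theorem pv_sum_take (c : List Int) (j : Nat) (hj : j ≤ c.length) :
    (c.take j).sum = ∑ k ∈ Finset.range j, c.getD k 0 := by
  induction j with
  | zero => simp
  | succ j ih =>
    rw [Finset.sum_range_succ, ← ih (by omega), pv_sum_take_succ c j (by omega)]

-- the diff-update phase of A: pointwise characterisation
theorem pv_diff_phase (rs : List (List Int)) (c : List Int)
    (h : ∀ r ∈ rs, 0 ≤ PySem.List.pyGetD r 0 0 ∧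
          PySem.List.pyGetD r 0 0 ≤ PySem.List.pyGetD r 1 0 ∧
          PySem.List.pyGetD r 1 0 + 1 < (c.length : Int)) :
    (rs.foldl pvStepA c).length = c.length ∧
    ∀ j : Nat, j < c.length →
      (rs.foldl pvStepA c).getD j 0 =
      c.getD j 0 + (rs.map (pvDeltaOne (j : Int))).sum := by
  induction rs generalizing c with
  | nil => simp
  | cons r rs ih =>
    obtain ⟨hs0, hse, he1⟩ := h r List.mem_cons_self
    have he0 : (0:Int) ≤ PySem.List.pyGetD r 1 0 + 1 := by omega
    have hsInt : PySem.List.pyGetD r 0 0 < (c.length : Int) := by omega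
    have hslt : (PySem.List.pyGetD r 0 0).toNat < c.length := by omega
    have helt : (PySem.List.pyGetD r 1 0 + 1).toNat < c.length := by omega
    have hsc : ((PySem.List.pyGetD r 0 0).toNat : Int) = PySem.List.pyGetD r 0 0 :=
      Int.toNat_of_nonneg hs0
    have hec : ((PySem.List.pyGetD r 1 0 + 1).toNat : Int) = PySem.List.pyGetD r 1 0 + 1 :=
      Int.toNat_of_nonneg he0
    simp only [List.foldl_cons, List.map_cons, List.sum_cons]
    rw [show pvStepA c r = PySem.List.pySetD
        (PySem.List.pySetD c (PySem.List.pyGetD r 0 0)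
          (PySem.List.pyGetD c (PySem.List.pyGetD r 0 0) 0 + 1))
        (PySem.List.pyGetD r 1 0 + 1)
        (PySem.List.pyGetD
          (PySem.List.pySetD c (PySem.List.pyGetD r 0 0)
            (PySem.List.pyGetD c (PySem.List.pyGetD r 0 0) 0 + 1))
          (PySem.List.pyGetD r 1 0 + 1) 0 - 1) from rfl]
    have hc1 : PySem.List.pySetD c (PySem.List.pyGetD r 0 0)
        (PySem.List.pyGetD c (PySem.List.pyGetD r 0 0) 0 + 1) =
        c.set (PySem.List.pyGetD r 0 0).toNat
          (c.getD (PySem.List.pyGetD r 0 0).toNat 0 + 1) := by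
      rw [PySem.List.pySetD_of_nonneg c _ hs0, PySem.List.pyGetD_eq_getElem c 0 hs0 hsInt,
          List.getD_eq_getElem _ _ hslt]
    set c1 := c.set (PySem.List.pyGetD r 0 0).toNat
        (c.getD (PySem.List.pyGetD r 0 0).toNat 0 + 1) with hc1def
    have h1len : c1.length = c.length := List.length_set ..
    have hg1 : ∀ j : Nat, c1.getD j 0 =
        if j = (PySem.List.pyGetD r 0 0).toNat then c.getD (PySem.List.pyGetD r 0 0).toNat 0 + 1
        else c.getD j 0 := by
      intro j; rw [hc1def, pv_getD_set c _ j _ hslt]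
    have heInt : PySem.List.pyGetD r 1 0 + 1 < (c1.length : Int) := by omega
    have helt1 : (PySem.List.pyGetD r 1 0 + 1).toNat < c1.length := by omega
    have hc2 : PySem.List.pySetD c1 (PySem.List.pyGetD r 1 0 + 1)
        (PySem.List.pyGetD c1 (PySem.List.pyGetD r 1 0 + 1) 0 - 1) =
        c1.set (PySem.List.pyGetD r 1 0 + 1).toNat
          (c1.getD (PySem.List.pyGetD r 1 0 + 1).toNat 0 - 1) := by
      rw [PySem.List.pySetD_of_nonneg c1 _ he0, PySem.List.pyGetD_eq_getElem c1 0 he0 heInt,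
          List.getD_eq_getElem _ _ helt1]
    set c2 := c1.set (PySem.List.pyGetD r 1 0 + 1).toNat
        (c1.getD (PySem.List.pyGetD r 1 0 + 1).toNat 0 - 1) with hc2def
    have h2len : c2.length = c.length := by rw [hc2def, List.length_set, h1len]
    have hg2 : ∀ j : Nat, c2.getD j 0 =
        if j = (PySem.List.pyGetD r 1 0 + 1).toNat then c1.getD (PySem.List.pyGetD r 1 0 + 1).toNat 0 - 1
        else c1.getD j 0 := by
      intro j; rw [hc2def, pv_getD_set c1 _ j _ helt1]
    have hstep : ∀ j : Nat, j < c.length →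
        c2.getD j 0 = c.getD j 0 + pvDeltaOne (j : Int) r := by
      intro j hj
      have hne_se : (PySem.List.pyGetD r 0 0).toNat ≠ (PySem.List.pyGetD r 1 0 + 1).toNat := by omega
      unfold pvDeltaOne
      rcases eq_or_ne j (PySem.List.pyGetD r 0 0).toNat with rfl | hnjs
      · rw [hg2 _, if_neg (by omega), hg1 _, if_pos rfl,
            if_pos (by omega), if_neg (by omega)]
        ring
      · rcases eq_or_ne j (PySem.List.pyGetD r 1 0 + 1).toNat with rfl | hnje
        · rw [hg2 _, if_pos rfl, hg1 _, if_neg hne_se.symm,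
              if_neg (by omega), if_pos (by omega)]
          ring
        · rw [hg2 _, if_neg hnje, hg1 _, if_neg hnjs,
              if_neg (by omega), if_neg (by omega)]
          ring
    rw [hc1, hc2]
    obtain ⟨ihl, ihg⟩ := ih c2 (by
      intro r' hr'
      obtain ⟨a, b, d⟩ := h r' (List.mem_cons_of_mem _ hr')
      exact ⟨a, b, by rw [h2len]; exact d⟩)
    refine ⟨by rw [ihl, h2len], fun j hj => ?_⟩
    rw [ihg j (by omega), hstep j hj]
    ring



-- the prefix-sum phase of A: pointwise characterisation
theorem pv_prefix_phase (c : List Int) (m : Nat) (hm : m ≤ c.length) :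
    ((PySem.List.pyRange 1 (m : Int) 1).foldl (fun c i =>
      PySem.List.pySetD c i (PySem.List.pyGetD c i 0 + PySem.List.pyGetD c (i-1) 0)) c).length = c.length ∧
    ∀ j : Nat, j < c.length →
      ((PySem.List.pyRange 1 (m : Int) 1).foldl (fun c i =>
        PySem.List.pySetD c i (PySem.List.pyGetD c i 0 + PySem.List.pyGetD c (i-1) 0)) c).getD j 0 =
      if j < m then (c.take (j+1)).sum else c.getD j 0 := by
  induction m with
  | zero =>
    rw [PySem.List.pyRange_one_eq_nil (by omega)]
    simp
  | succ m ih =>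
    rcases Nat.eq_zero_or_pos m with rfl | hm
    · rw [show (((0:Nat)+1 : Nat) : Int) = 1 by norm_num, PySem.List.pyRange_one_eq_nil (by omega)]
      refine ⟨rfl, fun j hj => ?_⟩
      rcases Nat.eq_zero_or_pos j with rfl | hjp
      · simp [pv_sum_take_succ c 0 hj, List.getD]
      · simp [Nat.pos_iff_ne_zero.mp hjp]
    · obtain ⟨ihlen, ihget⟩ := ih (by omega)
      rw [show ((m+1:Nat) : Int) = (m:Int) + 1 by push_cast; ring,
          PySem.List.pyRange_one_succ_right (by exact_mod_cast hm), List.foldl_append]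
      simp only [List.foldl_cons, List.foldl_nil]
      rw [PySem.List.pySetD_natCast, show ((m:Int) - 1) = ((m-1 : Nat) : Int) by omega,
          PySem.List.pyGetD_natCast, PySem.List.pyGetD_natCast]
      have hmlen : m < c.length := by omega
      constructor
      · rw [List.length_set, ihlen]
      · intro j hj
        rw [pv_getD_set _ m j _ (by omega)]
        rcases eq_or_ne j m with rfl | hne
        · simp only [if_pos (Nat.lt_succ_self j)]
          rw [ihget j hj, ihget (j-1) (by omega), if_neg (show ¬ j < j by omega),
              if_pos (show j - 1 < j by omega)]
          rw [pv_sum_take_succ c j hj, show (j-1)+1 = j by omega]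
          simp [add_comm]
        · rw [if_neg hne, ihget j hj]
          rcases Nat.lt_or_ge j m with hlt | hge
          · rw [if_pos hlt, if_pos (show j < m + 1 by omega)]
          · rw [if_neg (show ¬ j < m by omega), if_neg (show ¬ j < m + 1 by omega)]


-- per-request cumulative delta: summing the difference-array contribution up to j
theorem pv_delta_single (r : List Int)
    (h0 : 0 ≤ PySem.List.pyGetD r 0 0) (h1 : PySem.List.pyGetD r 0 0 ≤ PySem.List.pyGetD r 1 0)
    (j : Nat) :
    (∑ k ∈ Finset.range (j+1), pvDeltaOne (k : Int) r) =
    if PySem.List.pyGetD r 0 0 ≤ (j : Int) ∧ (j : Int) ≤ PySem.List.pyGetD r 1 0 then 1 else 0 := by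
  induction j with
  | zero =>
    rw [Finset.sum_range_succ, Finset.sum_range_zero]
    simp only [pvDeltaOne, Nat.cast_zero]
    split_ifs <;> omega
  | succ j ih =>
    rw [Finset.sum_range_succ, ih]
    simp only [pvDeltaOne]
    push_cast
    split_ifs <;> omega

-- the cumulative difference array equals the per-index request count
theorem pv_sum_delta (rs : List (List Int))
    (h : ∀ r ∈ rs, 0 ≤ PySem.List.pyGetD r 0 0 ∧ PySem.List.pyGetD r 0 0 ≤ PySem.List.pyGetD r 1 0)
    (j : Nat) :
    (∑ k ∈ Finset.range (j+1), (rs.map (pvDeltaOne (k : Int))).sum) =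
    rs.foldl (fun acc r =>
      if PySem.List.pyGetD r 0 0 ≤ (j : Int) ∧ (j : Int) ≤ PySem.List.pyGetD r 1 0 then acc + 1 else acc) 0 := by
  induction rs with
  | nil => simp
  | cons r rs ih =>
    have hr := h r (List.mem_cons_self)
    have ih' := ih (fun r' hr' => h r' (List.mem_cons_of_mem _ hr'))
    simp only [List.map_cons, List.sum_cons, List.foldl_cons]
    rw [Finset.sum_add_distrib, ih', pv_delta_single r hr.1 hr.2]
    rw [PySem.List.foldl_ite_add_one, PySem.List.foldl_ite_add_one]
    split_ifs <;> omega

-- the two coverage-count lists coincide under Pre_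
theorem pv_counts_eq (nums : List Int) (requests : List (List Int))
    (hpre : Pre_maxSumRangeQuery nums requests) :
    PySem.List.slice
      ((PySem.List.pyRange 1 (((nums.length+1 : Nat)) : Int) 1).foldl (fun c i =>
        PySem.List.pySetD c i (PySem.List.pyGetD c i 0 + PySem.List.pyGetD c (i-1) 0))
        (requests.foldl pvStepA (List.replicate (nums.length+1) 0)))
      none (some (-1)) =
    (PySem.List.pyRange 0 ((nums.length : Nat) : Int) 1).map (fun i =>
      requests.foldl (fun acc r =>
        if PySem.List.pyGetD r 0 0 ≤ i ∧ i ≤ PySem.List.pyGetD r 1 0 then acc + 1 else acc) 0) := by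
  have hrep : (List.replicate (nums.length+1) (0:Int)).length = nums.length + 1 := by simp
  have hb : ∀ r ∈ requests, 0 ≤ PySem.List.pyGetD r 0 0 ∧
      PySem.List.pyGetD r 0 0 ≤ PySem.List.pyGetD r 1 0 ∧
      PySem.List.pyGetD r 1 0 + 1 < ((List.replicate (nums.length+1) (0:Int)).length : Int) := by
    intro r hr
    obtain ⟨_, a, b, d⟩ := hpre r hr
    refine ⟨a, b, ?_⟩
    rw [hrep]; push_cast; omega
  obtain ⟨h1len, h1get⟩ := pv_diff_phase requests (List.replicate (nums.length+1) 0) hb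
  rw [hrep] at h1len h1get
  obtain ⟨h2len, h2get⟩ := pv_prefix_phase _ (nums.length+1) (le_of_eq h1len.symm)
  rw [h1len] at h2len h2get
  rw [PySem.List.slice_to_neg_one]
  apply List.ext_getElem
  · rw [List.length_dropLast, h2len, List.length_map, PySem.List.length_pyRange_one]
    omega
  · intro i hi1 hi2
    rw [List.length_dropLast, h2len] at hi1
    rw [List.getElem_dropLast]
    simp only [List.getElem_map, PySem.List.getElem_pyRange_one, zero_add]
    rw [← List.getD_eq_getElem _ 0 (by rw [h2len]; omega)]
    rw [h2get i (by omega), if_pos (by omega)]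
    rw [pv_sum_take _ (i+1) (by rw [h1len]; omega)]
    have hsummand : ∀ k ∈ Finset.range (i+1),
        (List.foldl pvStepA (List.replicate (nums.length+1) 0) requests).getD k 0 =
        (requests.map (pvDeltaOne (k : Int))).sum := by
      intro k hk
      have hk' : k < nums.length + 1 := by
        have := Finset.mem_range.mp hk; omega
      rw [h1get k (by omega)]
      simp [List.getD, hk']
    rw [Finset.sum_congr rfl hsummand,
        pv_sum_delta requests (fun r hr => ⟨(hpre r hr).2.1, (hpre r hr).2.2.1⟩) i]

-- ===== VERDICT (by name: the statement is the Claim_ definition above) =====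
theorem maxSumRangeQuery_spec : Claim_equal_maxSumRangeQuery := by
  intro nums requests _ hpre
  unfold Spec_maxSumRangeQuery maxSumRangeQuery maxSumRangeQuery_alt
  have hcast : ((nums.length : Int) + 1) = (((nums.length + 1 : Nat)) : Int) := by push_cast; ring
  simp only [hcast]
  rw [pv_counts_eq nums requests hpre]
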